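-- pv_equiv track=rewrite | github.com/axpokl/LightOut | ManimGL2/lights_out_gl2 - 副本 (48).py | make_mat_ky
-- ===== SOURCE A (Python) =====
-- def make_mat_ky(n):
--     def shl(v):
--         return [0] + v[:-1]
--     def shr(v):
--         return v[1:] + [0]
--     prev2 = [0]*n
--     prev = [0]*n
--     rows = []
--     rows.append([0]*n)
--     for _ in range(n):
--         cur = [(prev[j] ^ shl(prev)[j] ^ shr(prev)[j] ^ prev2[j]) ^ 1 for j in range(n)]
--         rows.append(cur)
--         prev2, prev = prev, cur
--     return rows
-- ===== SOURCE B (Python) =====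
-- def make_mat_ky(n):
--     m = max(n, 0)
--     mask = (1 << m) - 1
--     # Krylov basis: v[i] = M^i * ones over GF(2), M = shift-left + identity + shift-right
--     v = [mask]
--     for _ in range(m - 1):
--         t = v[-1]
--         v.append((t ^ (t << 1) ^ (t >> 1)) & mask)
--
--     def unpack(r):
--         return [(r >> j) & 1 for j in range(n)]
--
--     # scalar coefficient polynomials q_k over GF(2) (bit i = coeff of x^i):
--     # q_0 = 0, q_1 = 1, q_{k+1} = x*q_k + q_{k-1} + 1; row_k = q_k(M) * ones
--     rows = [unpack(0)]
--     q2, q = 0, 1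
--     for _ in range(n):
--         r, c, i = 0, q, 0
--         while c:
--             if c & 1:
--                 r ^= v[i]
--             c >>= 1
--             i += 1
--         rows.append(unpack(r))
--         q2, q = q, (q << 1) ^ q2 ^ 1
--     return rows
-- ===== Notes on version B (the rewrite author's own statement) =====
-- stated objective: faster
-- what changed: Instead of iterating the second-order vector recurrence row by row, B uses superposition: it precomputes once a Krylov basis of bitmasks (powers of the GF-two neighbour-xor operator applied to the all-ones vector), generates the scalar coefficient polynomials of the recurrence as small integers, and obtains each row as the xor of the basis vectors selected by the coefficient bits.
import Mathlib
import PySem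

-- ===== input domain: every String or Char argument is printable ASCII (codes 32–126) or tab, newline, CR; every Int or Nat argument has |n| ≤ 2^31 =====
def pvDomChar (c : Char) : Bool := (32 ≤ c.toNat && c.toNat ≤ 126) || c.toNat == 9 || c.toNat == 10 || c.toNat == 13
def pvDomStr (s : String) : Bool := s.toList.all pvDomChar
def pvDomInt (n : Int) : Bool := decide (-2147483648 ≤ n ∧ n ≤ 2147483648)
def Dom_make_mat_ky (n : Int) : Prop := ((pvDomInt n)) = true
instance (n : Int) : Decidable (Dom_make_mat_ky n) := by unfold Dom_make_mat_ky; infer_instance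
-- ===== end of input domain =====

-- B replaces A's second-order vector iteration by superposition over a precomputed Krylov
-- basis M^i*ones combined via scalar GF(2) coefficient polynomials on bitmasks (objective: faster).

-- ===== PORT A =====
def shlA (v : List Int) : List Int := 0 :: v.dropLast

def shrA (v : List Int) : List Int := v.tail ++ [0]

-- loop body of A's 'for _ in range(n)'; pyGetD is always in range (all lists have length n, j ∈ range(n))
def stepA (n : Int) (st : List Int × List Int × List (List Int)) :
    List Int × List Int × List (List Int) :=
  let prev2 := st.1
  let prev := st.2.1
  let rows := st.2.2
  let cur := (PySem.List.pyRange 0 n 1).map (fun j =>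
    Int.xor (Int.xor (Int.xor (Int.xor (PySem.List.pyGetD prev j 0) (PySem.List.pyGetD (shlA prev) j 0))
      (PySem.List.pyGetD (shrA prev) j 0)) (PySem.List.pyGetD prev2 j 0)) 1)
  (prev, cur, rows ++ [cur])

def make_mat_ky (n : Int) : List (List Int) :=
  ((PySem.List.pyRange 0 n 1).foldl (fun st _ => stepA n st)
    (List.replicate n.toNat 0, List.replicate n.toNat 0, [List.replicate n.toNat 0])).2.2

-- ===== PORT B =====
-- one Krylov step: (t ^ (t << 1) ^ (t >> 1)) & mask
def hstep (mask t : Nat) : Nat := (t ^^^ (t <<< 1) ^^^ (t >>> 1)) &&& mask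

-- the basis list v: built front to back from the last element, k more elements after t
def buildV (mask : Nat) : Nat → Nat → List Nat
  | 0, t => [t]
  | k+1, t => t :: buildV mask k (hstep mask t)

-- B's inner 'while c' accumulating r ^= v[i]; v[i] in range, ported as getD
def combineB (v : List Nat) (c i r : Nat) : Nat :=
  if _h : c = 0 then r
  else combineB v (c >>> 1) (i + 1) (if c &&& 1 = 1 then r ^^^ v.getD i 0 else r)
termination_by c
decreasing_by simp only [Nat.shiftRight_one]; omega

-- unpack a bitmask row r into [(r >> j) & 1 for j in range(N)]
def altRow (N : Nat) (r : Nat) : List Int :=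
  (List.range N).map (fun j => (((r >>> j) &&& 1 : Nat) : Int))

-- B's main loop: k remaining iterations, state (q2, q); emits the combined row for q, then advances
def bLoop (v : List Nat) (N : Nat) : Nat → Nat → Nat → List (List Int)
  | 0, _, _ => []
  | k+1, q2, q => altRow N (combineB v q 0 0) :: bLoop v N k q ((q <<< 1) ^^^ q2 ^^^ 1)

def make_mat_ky_alt (n : Int) : List (List Int) :=
  let m : Nat := n.toNat                    -- max(n, 0)
  let mask : Nat := (1 <<< m) - 1
  let v := buildV mask (m - 1) mask         -- v = [mask]; for _ in range(m-1): v.append(hstep(v[-1]))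
  altRow m 0 :: bLoop v m m 0 1

-- ===== PRECONDITION & SPEC =====
def Spec_make_mat_ky (n : Int) (out : List (List Int)) : Prop := out = make_mat_ky_alt n
instance (n : Int) (out : List (List Int)) : Decidable (Spec_make_mat_ky n out) := by unfold Spec_make_mat_ky; infer_instance

-- ===== CLAIM (what is proved, stated in full; the proofs are below) =====
def Claim_equal_make_mat_ky : Prop := ∀ (n : Int), Dom_make_mat_ky n → Spec_make_mat_ky n (make_mat_ky n)

-- ===== LEMMAS AND PROOFS =====

-- the new row bitmask computed from A's state (b2, b)
def curOf (mask b2 b : Nat) : Nat := (b ^^^ (b <<< 1) ^^^ (b >>> 1) ^^^ b2 ^^^ mask) &&& mask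

-- A's bitmask row sequence (abstraction of A's loop, proved equal to it below)
def altBits (mask : Nat) : Nat → Nat → Nat → List Nat
  | 0, _, _ => []
  | k+1, prev2, prev =>
    let cur := curOf mask prev2 prev
    cur :: altBits mask k prev cur

-- pure-Nat image of A's (prev2, prev) state after k iterations
def natState (mask : Nat) : Nat → Nat × Nat → Nat × Nat
  | 0, s => s
  | k+1, s => natState mask k (s.2, curOf mask s.1 s.2)

theorem shift_and_one (b j : Nat) : (b >>> j) &&& 1 = if b.testBit j then 1 else 0 := by
  rw [Nat.and_one_is_mod, Nat.shiftRight_eq_div_pow, Nat.testBit, Nat.shiftRight_eq_div_pow,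
      Nat.one_and_eq_mod_two]
  rcases Nat.mod_two_eq_zero_or_one (b / 2 ^ j) with h | h <;> simp [h]

theorem altRow_getD (N b j : Nat) (hj : j < N) :
    (altRow N b).getD j 0 = (((b >>> j) &&& 1 : Nat) : Int) := by
  simp [altRow, List.getD, hj]

theorem altRow_zero (N : Nat) : altRow N 0 = List.replicate N 0 := by
  simp [altRow, List.map_const']

theorem shl_altRow (N b : Nat) (hN : 0 < N) : shlA (altRow N b) = altRow N (b <<< 1) := by
  apply List.ext_getElem
  · simp [shlA, altRow]; omega
  · intro i h1 h2
    match i with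
    | 0 => simp [shlA, altRow, Nat.shiftLeft_eq]
    | k+1 =>
      have hk : k + 1 < N := by simpa [altRow] using h2
      simp only [shlA, List.getElem_cons_succ]
      rw [List.getElem_dropLast]
      simp [altRow, Nat.shiftLeft_eq, Nat.shiftRight_eq_div_pow, pow_succ]

theorem shr_altRow (N b : Nat) (hN : 0 < N) (hb : b < 2^N) :
    shrA (altRow N b) = altRow N (b >>> 1) := by
  apply List.ext_getElem
  · simp [shrA, altRow]; omega
  · intro i h1 h2
    have hi : i < N := by simpa [altRow] using h2
    by_cases hlast : i < N - 1
    · simp only [shrA]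
      rw [List.getElem_append_left (by simp [altRow]; omega)]
      simp only [altRow, List.getElem_tail, List.getElem_map, List.getElem_range]
      congr 1
      rw [← Nat.shiftRight_add]
      norm_num [Nat.add_comm]
    · have hieq : i = N - 1 := by omega
      simp only [shrA]
      rw [List.getElem_append_right (by simp [altRow]; omega)]
      simp only [altRow, List.getElem_map, List.getElem_range, List.length_tail,
        List.length_map, List.length_range, hieq]
      rw [← Nat.shiftRight_add]
      have h1N : 1 + (N - 1) = N := by omega
      rw [h1N, Nat.shiftRight_eq_div_pow, Nat.div_eq_of_lt hb]
      simp

theorem curOf_lt (N b2 b : Nat) : curOf (2^N - 1) b2 b < 2^N := by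
  have h := Nat.two_pow_pos N
  exact lt_of_le_of_lt Nat.and_le_right (by omega)

theorem bit_step (N j b2 b : Nat) (hj : j < N) :
    Int.xor (Int.xor (Int.xor (Int.xor (((b >>> j) &&& 1 : Nat) : Int) (((b <<< 1 >>> j) &&& 1 : Nat) : Int))
      (((b >>> 1 >>> j) &&& 1 : Nat) : Int)) (((b2 >>> j) &&& 1 : Nat) : Int)) 1
    = (((curOf (2^N - 1) b2 b >>> j) &&& 1 : Nat) : Int) := by
  simp only [shift_and_one]
  have h5 : (curOf (2^N - 1) b2 b).testBit j
      = !((b.testBit j) ^^ ((b <<< 1).testBit j) ^^ ((b >>> 1).testBit j) ^^ (b2.testBit j)) := by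
    simp [curOf, Nat.testBit_xor, Nat.testBit_two_pow_sub_one, hj]
  rw [h5]
  cases b.testBit j <;> cases (b <<< 1).testBit j <;> cases (b >>> 1).testBit j <;>
    cases b2.testBit j <;> decide

theorem stepA_eq (N : Nat) (hN : 0 < N) (b2 b : Nat) (hb : b < 2^N) (rows : List (List Int)) :
    stepA (N : Int) (altRow N b2, altRow N b, rows)
    = (altRow N b, altRow N (curOf (2^N - 1) b2 b),
       rows ++ [altRow N (curOf (2^N - 1) b2 b)]) := by
  have hcur : (PySem.List.pyRange 0 (N : Int) 1).map (fun j =>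
      Int.xor (Int.xor (Int.xor (Int.xor (PySem.List.pyGetD (altRow N b) j 0)
        (PySem.List.pyGetD (shlA (altRow N b)) j 0))
        (PySem.List.pyGetD (shrA (altRow N b)) j 0))
        (PySem.List.pyGetD (altRow N b2) j 0)) 1)
      = altRow N (curOf (2^N - 1) b2 b) := by
    rw [shl_altRow N b hN, shr_altRow N b hN hb, PySem.List.pyRange_one]
    have hNN : ((N : Int) - 0).toNat = N := by omega
    rw [hNN, List.map_map]
    show _ = (List.range N).map _
    apply List.map_congr_left
    intro k hk
    have hkN : k < N := List.mem_range.mp hk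
    simp only [Function.comp_apply, zero_add, PySem.List.pyGetD_natCast,
      List.getD_eq_getElem?_getD]
    simp only [← List.getD_eq_getElem?_getD,
      altRow_getD N b k hkN, altRow_getD N (b <<< 1) k hkN,
      altRow_getD N (b >>> 1) k hkN, altRow_getD N b2 k hkN]
    exact bit_step N k b2 b hkN
  show (altRow N b, _, rows ++ [_]) = _
  rw [hcur]

theorem foldl_ignore {σ α : Type} (g : σ → σ) :
    ∀ (l : List α) (s : σ), l.foldl (fun s _ => g s) s = g^[l.length] s := by
  intro l
  induction l with
  | nil => intro s; simp
  | cons x xs ih =>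
    intro s
    simp [List.foldl_cons, ih, Function.iterate_succ_apply]

theorem iter_stepA (N : Nat) (hN : 0 < N) :
    ∀ (k b2 b : Nat) (rows : List (List Int)), b < 2^N →
    (stepA (N : Int))^[k] (altRow N b2, altRow N b, rows)
    = (altRow N (natState (2^N - 1) k (b2, b)).1,
       altRow N (natState (2^N - 1) k (b2, b)).2,
       rows ++ (altBits (2^N - 1) k b2 b).map (altRow N)) := by
  intro k
  induction k with
  | zero => intro b2 b rows hb; simp [natState, altBits]
  | succ k ih =>
    intro b2 b rows hb
    rw [Function.iterate_succ_apply, stepA_eq N hN b2 b hb rows,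
        ih b (curOf (2^N - 1) b2 b) _ (curOf_lt N b2 b)]
    simp [natState, altBits, curOf]

-- ---- B-side: Krylov basis as a function, and the xor-combination gV ----

-- V i = M^i * ones as a bitmask
def Vf (mask i : Nat) : Nat := (hstep mask)^[i] mask

def gV (mask : Nat) (c i : Nat) : Nat :=
  if _h : c = 0 then 0
  else (if c &&& 1 = 1 then Vf mask i else 0) ^^^ gV mask (c >>> 1) (i + 1)
termination_by c
decreasing_by simp only [Nat.shiftRight_one]; omega

theorem shiftRight_one_xor (a b : Nat) : (a ^^^ b) >>> 1 = (a >>> 1) ^^^ (b >>> 1) := by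
  apply Nat.eq_of_testBit_eq
  intro j
  simp [Nat.testBit_shiftRight, Nat.testBit_xor]

theorem shiftLeft_one_xor (a b : Nat) : (a ^^^ b) <<< 1 = (a <<< 1) ^^^ (b <<< 1) := by
  apply Nat.eq_of_testBit_eq
  intro j
  simp only [Nat.testBit_shiftLeft, Nat.testBit_xor]
  by_cases hj : 1 ≤ j <;> simp [hj]

theorem gV_ne (mask c i : Nat) (hc : c ≠ 0) :
    gV mask c i = (if c &&& 1 = 1 then Vf mask i else 0) ^^^ gV mask (c >>> 1) (i + 1) := by
  rw [gV, dif_neg hc]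

theorem combineB_ne (v : List Nat) (c i r : Nat) (hc : c ≠ 0) :
    combineB v c i r
    = combineB v (c >>> 1) (i + 1) (if c &&& 1 = 1 then r ^^^ v.getD i 0 else r) := by
  rw [combineB, dif_neg hc]

theorem xor_left_comm_nat (a b c : Nat) : a ^^^ (b ^^^ c) = b ^^^ (a ^^^ c) := by
  rw [← Nat.xor_assoc, Nat.xor_comm a b, Nat.xor_assoc]

theorem hstep_xor (mask a b : Nat) : hstep mask (a ^^^ b) = hstep mask a ^^^ hstep mask b := by
  unfold hstep
  rw [shiftLeft_one_xor, shiftRight_one_xor, ← Nat.and_xor_distrib_right]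
  apply congrArg (· &&& mask)
  apply Nat.eq_of_testBit_eq
  intro j
  simp only [Nat.testBit_xor]
  cases a.testBit j <;> cases b.testBit j <;> cases (a <<< 1).testBit j <;>
    cases (b <<< 1).testBit j <;> cases (a >>> 1).testBit j <;> cases (b >>> 1).testBit j <;> rfl

theorem hstep_zero (mask : Nat) : hstep mask 0 = 0 := by
  simp [hstep]

theorem gV_zero (mask i : Nat) : gV mask 0 i = 0 := by
  simp [gV]

theorem gV_one (mask i : Nat) : gV mask 1 i = Vf mask i := by
  rw [gV_ne mask 1 i (by decide)]
  simp [gV_zero]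

theorem and_one_cases (x : Nat) : x &&& 1 = 1 ∨ x &&& 1 = 0 := by
  rcases Nat.mod_two_eq_zero_or_one x with h | h <;> simp [Nat.and_one_is_mod, h]

theorem gV_xor (mask : Nat) : ∀ a b i, gV mask (a ^^^ b) i = gV mask a i ^^^ gV mask b i := by
  intro a
  induction a using Nat.strong_induction_on with
  | _ a ih =>
    intro b i
    by_cases ha : a = 0
    · simp [ha, gV_zero]
    by_cases hb : b = 0
    · simp [hb, gV_zero]
    by_cases hab : a ^^^ b = 0
    · rw [hab, gV_zero]
      have hEq : a = b := by
        have h2 := congrArg (· ^^^ b) hab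
        simpa [Nat.xor_assoc] using h2
      simp [hEq]
    have hlt : a >>> 1 < a := by
      simp only [Nat.shiftRight_one]; omega
    rw [gV_ne mask (a ^^^ b) i hab, gV_ne mask a i ha, gV_ne mask b i hb, shiftRight_one_xor,
        ih (a >>> 1) hlt (b >>> 1) (i + 1)]
    have hbit : (a ^^^ b) &&& 1 = (a &&& 1) ^^^ (b &&& 1) := Nat.and_xor_distrib_right
    rw [hbit]
    generalize gV mask (a >>> 1) (i+1) = X
    generalize gV mask (b >>> 1) (i+1) = Y
    rcases and_one_cases a with h2 | h2 <;> rcases and_one_cases b with h3 | h3 <;>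
      simp only [h2, h3] <;> norm_num
    · rw [Nat.xor_assoc, xor_left_comm_nat X (Vf mask i) Y, ← Nat.xor_assoc,
          Nat.xor_self, Nat.zero_xor]
    · rw [Nat.xor_assoc]
    · rw [xor_left_comm_nat X (Vf mask i) Y]

theorem hstep_gV (mask : Nat) : ∀ c i, hstep mask (gV mask c i) = gV mask c (i + 1) := by
  intro c
  induction c using Nat.strong_induction_on with
  | _ c ih =>
    intro i
    by_cases hc : c = 0
    · simp [hc, gV_zero, hstep_zero]
    have hlt : c >>> 1 < c := by
      simp only [Nat.shiftRight_one]; omega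
    rw [gV_ne mask c i hc, hstep_xor, ih (c >>> 1) hlt (i + 1), gV_ne mask c (i + 1) hc]
    apply congrArg (· ^^^ gV mask (c >>> 1) (i + 1 + 1))
    split
    · simp [Vf, Function.iterate_succ_apply']
    · exact hstep_zero mask

theorem gV_shiftLeft (mask c i : Nat) : gV mask (c <<< 1) i = gV mask c (i + 1) := by
  by_cases hc : c = 0
  · simp [hc, gV_zero]
  have hc2 : c <<< 1 = 2 * c := by rw [Nat.shiftLeft_eq]; ring
  have hne : c <<< 1 ≠ 0 := by rw [hc2]; omega
  rw [gV_ne mask (c <<< 1) i hne, hc2]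
  have hb : (2 * c) &&& 1 = 0 := by
    rw [Nat.and_one_is_mod]; omega
  have hs : (2 * c) >>> 1 = c := by
    rw [Nat.shiftRight_one]; omega
  simp [hb, hs]

theorem Vf_lt (N : Nat) : ∀ i, Vf (2^N - 1) i < 2^N := by
  intro i
  cases i with
  | zero =>
    have h2 := Nat.two_pow_pos N
    simp only [Vf, Function.iterate_zero_apply]
    omega
  | succ j =>
    have h1 : Vf (2^N - 1) (j+1) = hstep (2^N - 1) (Vf (2^N - 1) j) := by
      simp [Vf, Function.iterate_succ_apply']
    rw [h1]
    have h2 := Nat.two_pow_pos N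
    exact lt_of_le_of_lt Nat.and_le_right (by omega)

theorem gV_lt (N : Nat) : ∀ c i, gV (2^N - 1) c i < 2^N := by
  intro c
  induction c using Nat.strong_induction_on with
  | _ c ih =>
    intro i
    by_cases hc : c = 0
    · simp [hc, gV_zero]
    have hlt : c >>> 1 < c := by
      simp only [Nat.shiftRight_one]; omega
    rw [gV, dif_neg hc]
    have h1 : (if c &&& 1 = 1 then Vf (2^N - 1) i else 0) < 2^N := by
      split
      · exact Vf_lt N i
      · exact Nat.two_pow_pos N
    exact Nat.xor_lt_two_pow h1 (ih (c >>> 1) hlt (i + 1))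

-- curOf in terms of hstep, under a bound on b2
theorem curOf_decomp (N b2 b : Nat) (hb2 : b2 < 2^N) :
    curOf (2^N - 1) b2 b = hstep (2^N - 1) b ^^^ b2 ^^^ (2^N - 1) := by
  unfold curOf hstep
  rw [Nat.and_xor_distrib_right, Nat.and_xor_distrib_right]
  rw [Nat.and_two_pow_sub_one_eq_mod b2 N, Nat.mod_eq_of_lt hb2, Nat.and_self]

-- B's list v agrees with Vf on valid indices
theorem buildV_getD (mask : Nat) :
    ∀ k t i, i ≤ k → (buildV mask k t).getD i 0 = (hstep mask)^[i] t := by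
  intro k
  induction k with
  | zero =>
    intro t i hi
    interval_cases i
    simp [buildV]
  | succ k ih =>
    intro t i hi
    cases i with
    | zero => simp [buildV]
    | succ j =>
      have h1 := ih (hstep mask t) j (by omega)
      simpa [buildV, Function.iterate_succ_apply] using h1

-- combineB equals gV when all selected indices are in range of B's Krylov list
theorem combineB_eq_gV (N : Nat) (hN : 0 < N) :
    ∀ c i r, (∀ j, c.testBit j = true → i + j < N) →
    combineB (buildV (2^N - 1) (N - 1) (2^N - 1)) c i r = r ^^^ gV (2^N - 1) c i := by
  intro c
  induction c using Nat.strong_induction_on with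
  | _ c ih =>
    intro i r hbits
    by_cases hc : c = 0
    · simp [hc, combineB, gV_zero]
    have hlt : c >>> 1 < c := by
      simp only [Nat.shiftRight_one]; omega
    have hbits' : ∀ j, (c >>> 1).testBit j = true → (i + 1) + j < N := by
      intro j hj
      have := hbits (1 + j) (by simpa [Nat.testBit_shiftRight] using hj)
      omega
    rw [combineB_ne _ c i r hc, ih (c >>> 1) hlt (i + 1) _ hbits', gV_ne _ c i hc]
    rcases and_one_cases c with h2 | h2
    · have hbit0 : c.testBit 0 = true := by
        simpa [Nat.testBit_zero, Nat.and_one_is_mod] using h2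
      have hiN : i ≤ N - 1 := by have := hbits 0 hbit0; omega
      rw [h2]
      simp only [reduceIte]
      rw [buildV_getD (2^N - 1) (N - 1) (2^N - 1) i hiN]
      show (r ^^^ Vf (2^N - 1) i) ^^^ _ = _
      simp [Nat.xor_assoc]
    · rw [h2]
      norm_num

theorem lt_two_pow_step (d a b : Nat) (ha : a < 2^d) (hb : b < 2^d) :
    (b <<< 1) ^^^ a ^^^ 1 < 2^(d+1) := by
  have he : (2:Nat)^(d+1) = 2^d * 2 := pow_succ 2 d
  have h1 : b <<< 1 < 2^(d+1) := by
    rw [Nat.shiftLeft_eq]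
    have h21 : b * 2^1 = b * 2 := by norm_num
    rw [h21, he]
    omega
  have h2 : a < 2^(d+1) := lt_of_lt_of_le ha (Nat.pow_le_pow_right (by norm_num) (by omega))
  have h3 : (1:Nat) < 2^(d+1) := Nat.one_lt_two_pow_iff.mpr (by omega)
  exact Nat.xor_lt_two_pow (Nat.xor_lt_two_pow h1 h2) h3

-- the central correspondence: A's bitmask rows are B's Krylov combinations
theorem altBits_eq_bLoop (N : Nat) (hN : 0 < N) :
    ∀ k a b d, a < 2^d → b < 2^d → d + k ≤ N →
    (altBits (2^N - 1) k (gV (2^N - 1) a 0) (gV (2^N - 1) b 0)).map (altRow N)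
    = bLoop (buildV (2^N - 1) (N - 1) (2^N - 1)) N k b ((b <<< 1) ^^^ a ^^^ 1) := by
  intro k
  induction k with
  | zero => intro a b d ha hb hd; simp [altBits, bLoop]
  | succ k ih =>
    intro a b d ha hb hd
    have hq : (b <<< 1) ^^^ a ^^^ 1 < 2^(d+1) := lt_two_pow_step d a b ha hb
    have hqbits : ∀ j, ((b <<< 1) ^^^ a ^^^ 1).testBit j = true → 0 + j < N := by
      intro j hj
      by_contra hge
      have hjd : 2^(d+1) ≤ 2^j := Nat.pow_le_pow_right (by norm_num) (by omega)
      have : ((b <<< 1) ^^^ a ^^^ 1).testBit j = false :=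
        Nat.testBit_eq_false_of_lt (lt_of_lt_of_le hq hjd)
      simp [this] at hj
  -- head: curOf of the combinations is the combination of the advanced polynomial
    have hhead : curOf (2^N - 1) (gV (2^N - 1) a 0) (gV (2^N - 1) b 0)
        = gV (2^N - 1) ((b <<< 1) ^^^ a ^^^ 1) 0 := by
      rw [curOf_decomp N _ _ (gV_lt N a 0), hstep_gV, ← gV_shiftLeft,
          gV_xor, gV_xor, gV_one]
      have hV0 : Vf (2^N - 1) 0 = 2^N - 1 := by simp [Vf]
      rw [hV0]
    have htail := ih b ((b <<< 1) ^^^ a ^^^ 1) (d+1)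
      (lt_of_lt_of_le hb (Nat.pow_le_pow_right (by norm_num) (by omega))) hq (by omega)
    simp only [altBits, bLoop, List.map_cons]
    rw [combineB_eq_gV N hN _ 0 0 hqbits, Nat.zero_xor, hhead, htail]

-- ===== VERDICT (by name: the statement is the Claim_ definition above) =====
theorem make_mat_ky_spec : Claim_equal_make_mat_ky := by
  intro n _
  unfold Spec_make_mat_ky make_mat_ky make_mat_ky_alt
  by_cases h : 0 < n
  · have hn : n = (n.toNat : Int) := (Int.toNat_of_nonneg (le_of_lt h)).symm
    set N := n.toNat with hN
    have hNpos : 0 < N := by omega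
    rw [hn, foldl_ignore, PySem.List.length_pyRange_one]
    have hlen : ((N : Int) - 0).toNat = N := by omega
    rw [hlen, ← altRow_zero N, iter_stepA N hNpos N 0 0 [altRow N 0] (Nat.two_pow_pos N)]
    have hmask : (1 <<< N) - 1 = 2^N - 1 := by
      simp [Nat.shiftLeft_eq]
    show [altRow N 0] ++ (altBits (2^N - 1) N 0 0).map (altRow N) = _
    have hmain := altBits_eq_bLoop N hNpos N 0 0 0 (by norm_num) (by norm_num) (by omega)
    rw [gV_zero] at hmain
    have hq1 : ((0 : Nat) <<< 1) ^^^ 0 ^^^ 1 = 1 := by decide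
    rw [hq1] at hmain
    simp only [hmask]
    rw [hmain]
    rfl
  · have hz : n.toNat = 0 := by omega
    rw [PySem.List.pyRange_one_eq_nil (by omega)]
    simp [hz, bLoop, altRow]
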